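-- pv_equiv track=rewrite | github.com/ayukyo/alltoolkit | Python/cookie_utils/mod.py | validate_cookie_name
-- ===== SOURCE A (Python) =====
-- def validate_cookie_name(name: str) -> bool:
--     """
--     Validate a cookie name according to RFC 6265.
--
--     Cookie names must be ASCII and cannot contain:
--     Control characters, space, tab, or: ()<>@,;:\"/[]?={}
--
--     Args:
--         name: The cookie name to validate
--
--     Returns:
--         True if the name is valid
--     """
--     if not name:
--         return False
--
--     # Invalid characters in cookie names
--     invalid_chars = set('()<>@,;:"/[]?={} \t')
--
--     for char in name:
--         if ord(char) < 32 or ord(char) > 126: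
--             return False
--         if char in invalid_chars:
--             return False
--
--     return True
-- ===== SOURCE B (Python) =====
-- # Every character allowed in a cookie name (ASCII 33-126 minus the RFC 6265 separators).
-- _ALLOWED = ''.join(chr(c) for c in range(33, 127) if chr(c) not in '()<>@,;:"/[]?={}')
--
--
-- def validate_cookie_name(name: str) -> bool:
--     # str.strip trims allowed characters from both ends; it consumes the whole
--     # string exactly when every character is allowed.
--     return bool(name) and not name.strip(_ALLOWED)
-- ===== Notes on version B (the rewrite author's own statement) =====
-- stated objective: idiomatic
-- what changed: Instead of scanning left-to-right with early returns over a forbidden set, B trims the string from both ends with str.strip over a precomputed allowed-character alphabet and declares the name valid iff the strip consumes everything; strip runs in C, removing the per-character Python loop.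
import Mathlib
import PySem

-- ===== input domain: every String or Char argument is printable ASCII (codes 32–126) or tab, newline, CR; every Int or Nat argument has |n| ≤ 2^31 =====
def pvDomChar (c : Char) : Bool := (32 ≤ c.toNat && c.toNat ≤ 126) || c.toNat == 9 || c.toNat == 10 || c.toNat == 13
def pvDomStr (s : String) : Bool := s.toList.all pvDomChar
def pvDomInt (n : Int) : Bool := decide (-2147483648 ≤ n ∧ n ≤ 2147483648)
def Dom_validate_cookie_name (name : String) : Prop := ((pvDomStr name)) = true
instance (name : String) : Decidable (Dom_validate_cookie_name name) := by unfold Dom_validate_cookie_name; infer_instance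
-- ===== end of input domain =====

-- B replaces A's left-to-right scan with early returns by str.strip over the precomputed allowed alphabet: valid iff nonempty and the strip consumes everything (idiomatic; same cost).

-- ===== PORT A =====
-- invalid_chars = set('()<>@,;:"/[]?={} \t')
def pvInvalidCharsA : PySem.Set Char := PySem.Set.ofList "()<>@,;:\"/[]?={} \t".toList

-- the for-loop over name with early returns
def pvLoopA : List Char → Bool
  | [] => true
  | c :: cs =>
    if c.toNat < 32 || c.toNat > 126 then false
    else if PySem.Set.contains pvInvalidCharsA c then false
    else pvLoopA cs

def validate_cookie_name (name : String) : Bool :=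
  if name.toList = [] then false
  else pvLoopA name.toList

-- ===== PORT B =====
-- _ALLOWED = ''.join(chr(c) for c in range(33, 127) if chr(c) not in '()<>@,;:"/[]?={}')
def pvAllowedB : List Char :=
  ((PySem.List.pyRange 33 127 1).map (fun n => Char.ofNat n.toNat)).filter
    (fun c => !("()<>@,;:\"/[]?={}".toList.contains c))

-- bool(name) and not name.strip(_ALLOWED)
def validate_cookie_name_alt (name : String) : Bool :=
  decide (name.toList ≠ []) && decide (PySem.Chars.stripChars name.toList pvAllowedB = [])

-- ===== PRECONDITION & SPEC =====
def Spec_validate_cookie_name (name : String) (out : Bool) : Prop := out = validate_cookie_name_alt name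
instance (name : String) (out : Bool) : Decidable (Spec_validate_cookie_name name out) := by unfold Spec_validate_cookie_name; infer_instance

-- ===== CLAIM (what is proved, stated in full; the proofs are below) =====
def Claim_equal_validate_cookie_name : Prop := ∀ (name : String), Dom_validate_cookie_name name → Spec_validate_cookie_name name (validate_cookie_name name)

-- ===== LEMMAS AND PROOFS =====

-- A's per-character test, as a predicate
def pvCharOK (c : Char) : Bool :=
  !(c.toNat < 32 || c.toNat > 126) && !(PySem.Set.contains pvInvalidCharsA c)

-- A's loop is the conjunction of its per-character tests
theorem pvLoopA_eq_all (l : List Char) : pvLoopA l = l.all pvCharOK := by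
  induction l with
  | nil => rfl
  | cons c cs ih =>
    show (if _ then false else if _ then false else pvLoopA cs) = _
    rw [List.all_cons, ih, pvCharOK]
    cases h1 : (c.toNat < 32 || c.toNat > 126) <;>
      cases h2 : PySem.Set.contains pvInvalidCharsA c <;> simp

-- on every character of the domain, membership in B's allowed alphabet equals A's per-character test
set_option maxRecDepth 40000 in
theorem pvChar_key : ∀ n : Nat, n < 127 →
    (pvAllowedB.contains (Char.ofNat n) = pvCharOK (Char.ofNat n)) := by decide

theorem pvChar_eq (c : Char) (h : pvDomChar c = true) :
    pvAllowedB.contains c = pvCharOK c := by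
  have hlt : c.toNat < 127 := by
    simp [pvDomChar] at h
    omega
  simpa [Char.ofNat_toNat] using pvChar_key c.toNat hlt

-- stripping the allowed alphabet from both ends empties the string iff every character is allowed
theorem pvStrip_nil_iff (l cs : List Char) :
    (PySem.Chars.stripChars l cs = []) ↔ (∀ c ∈ l, cs.contains c = true) := by
  unfold PySem.Chars.stripChars
  simp only [List.reverse_eq_nil_iff, List.dropWhile_eq_nil_iff, List.mem_reverse]
  constructor
  · intro h c hc
    rcases (List.mem_append).mp (by simpa [List.takeWhile_append_dropWhile] using hc :
        c ∈ l.takeWhile (fun c => cs.contains c) ++ l.dropWhile (fun c => cs.contains c))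
      with htk | hdp
    · exact List.mem_takeWhile_imp htk
    · exact h c hdp
  · intro h c hc
    exact h c (List.dropWhile_subset _ hc)

-- ===== VERDICT (by name: the statement is the Claim_ definition above) =====
theorem validate_cookie_name_spec : Claim_equal_validate_cookie_name := by
  intro name hdom
  unfold Spec_validate_cookie_name validate_cookie_name validate_cookie_name_alt
  have hall : ∀ c ∈ name.toList, pvDomChar c = true := by
    simpa [Dom_validate_cookie_name, pvDomStr, List.all_eq_true] using hdom
  by_cases hemp : name.toList = []
  · simp [hemp]
  · rw [if_neg hemp, pvLoopA_eq_all, decide_eq_true (show name.toList ≠ [] from hemp),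
      Bool.true_and]
    by_cases h : ∀ c ∈ name.toList, pvCharOK c = true
    · have : PySem.Chars.stripChars name.toList pvAllowedB = [] :=
        (pvStrip_nil_iff _ _).mpr (fun c hc => (pvChar_eq c (hall c hc)).trans (h c hc))
      simp only [this, decide_true, List.all_eq_true]
      exact h
    · have : ¬ PySem.Chars.stripChars name.toList pvAllowedB = [] := fun hs =>
        h (fun c hc => (pvChar_eq c (hall c hc)).symm.trans
          ((pvStrip_nil_iff _ _).mp hs c hc))
      rw [decide_eq_false this]
      cases ha : name.toList.all pvCharOK
      · rfl
      · exact absurd (by simpa [List.all_eq_true] using ha) h
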